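-- pv_equiv track=rewrite | github.com/triquetrx/HackerRank | strng.py | isConvertible
-- ===== SOURCE A (Python) =====
-- def isConvertible(str1, str2, k):
--     if ((len(str1) + len(str2)) < k):
--         return True
--     commonLength = 0
--     for i in range(0, min(len(str1),len(str2)), 1):
--         if (str1[i] == str2[i]):
--             commonLength += 1
--         else:
--             break
--     if ((k - len(str1) - len(str2) + 2 * commonLength) % 2 == 0):
--         return True
--     return False
-- ===== SOURCE B (Python) =====
-- def isConvertible(str1, str2, k):
--     # 2*commonLength is always even, so parity depends only on k - len(str1) - len(str2)
--     if (len(str1) + len(str2)) < k: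
--         return True
--     return (k - len(str1) - len(str2)) % 2 == 0
-- ===== Notes on version B (the rewrite author's own statement) =====
-- stated objective: faster
-- what changed: Dropped the common-prefix scan entirely: since 2*commonLength is even it never affects the parity test, so B returns (k - len(str1) - len(str2)) % 2 == 0 directly after the same early guard.
import Mathlib
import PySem

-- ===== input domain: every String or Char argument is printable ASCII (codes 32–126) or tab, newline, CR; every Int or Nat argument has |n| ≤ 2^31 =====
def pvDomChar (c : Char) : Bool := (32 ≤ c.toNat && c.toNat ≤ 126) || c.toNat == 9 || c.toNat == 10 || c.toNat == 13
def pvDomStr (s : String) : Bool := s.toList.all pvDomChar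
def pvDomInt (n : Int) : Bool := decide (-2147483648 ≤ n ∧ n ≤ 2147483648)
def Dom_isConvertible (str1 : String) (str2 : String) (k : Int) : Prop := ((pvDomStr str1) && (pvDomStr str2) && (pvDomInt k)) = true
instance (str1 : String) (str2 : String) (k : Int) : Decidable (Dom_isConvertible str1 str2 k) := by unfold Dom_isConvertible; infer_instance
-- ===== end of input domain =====

-- ===== PORT A =====
-- prefix scan of A: counts matching leading characters, stops at first mismatch (the loop's break)
def pvCommonLen : List Char → List Char → Int
  | a :: as, b :: bs => if a == b then 1 + pvCommonLen as bs else 0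
  | _, _ => 0

def isConvertible (str1 : String) (str2 : String) (k : Int) : Bool :=
  if (PySem.Str.len str1 + PySem.Str.len str2) < k then true
  else
    let commonLength := pvCommonLen str1.toList str2.toList
    if PySem.Int.mod (k - PySem.Str.len str1 - PySem.Str.len str2 + 2 * commonLength) 2 == 0 then true
    else false

-- ===== PORT B =====
-- B: same guard, then the parity of k - len1 - len2 alone (2*commonLength is even, so it never matters)
def isConvertible_alt (str1 : String) (str2 : String) (k : Int) : Bool :=
  if (PySem.Str.len str1 + PySem.Str.len str2) < k then true
  else PySem.Int.mod (k - PySem.Str.len str1 - PySem.Str.len str2) 2 == 0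

-- ===== PRECONDITION & SPEC =====
def Spec_isConvertible (str1 : String) (str2 : String) (k : Int) (out : Bool) : Prop := out = isConvertible_alt str1 str2 k
instance (str1 : String) (str2 : String) (k : Int) (out : Bool) : Decidable (Spec_isConvertible str1 str2 k out) := by unfold Spec_isConvertible; infer_instance

-- ===== CLAIM (what is proved, stated in full; the proofs are below) =====
def Claim_equal_isConvertible : Prop := ∀ (str1 : String) (str2 : String) (k : Int), Dom_isConvertible str1 str2 k → Spec_isConvertible str1 str2 k (isConvertible str1 str2 k)

-- ===== LEMMAS AND PROOFS =====

-- ===== VERDICT (by name: the statement is the Claim_ definition above) =====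
-- adding an even term does not change Python's mod-2 result
lemma pv_mod_two_shift (x c : Int) :
    PySem.Int.mod (x + 2 * c) 2 = PySem.Int.mod x 2 := by
  simp [PySem.Int.mod, Int.add_mul_fmod_self_left]

theorem isConvertible_spec : Claim_equal_isConvertible := by
  intro str1 str2 k _
  unfold Spec_isConvertible isConvertible isConvertible_alt
  split
  · rfl
  · simp only [pv_mod_two_shift]
    split <;> simp_all
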